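-- pv_equiv track=rewrite | github.com/Google-DSC-SCH/2022-GDSCSCH-AlgorithmStudy | 34_최재원/0113 기사단원의 무기.py | solution
-- ===== SOURCE A (Python) =====
-- def solution(number, limit, power):
--     answer = 0
--     for n in range(1,number+1):
--         #기사단원 하나씩
--         ct = 0
--         for i in range(1,n+1):
--             if n%i == 0: #나누어 떨어짐 = 약수
--                 ct += 1
--         #ct = 현재 기사의 약수개수
--
--         #제한수치를 초과시
--         if ct > limit: answer += power #철의 무게 더 해줌
--         else: answer += ct #""
--     return answer
-- ===== SOURCE B (Python) =====
-- def solution(number, limit, power):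
--     # Divisor-count sieve: bump every multiple of each i once, then sum capped counts.
--     cnt = [0] * (number + 1)
--     for i in range(1, number + 1):
--         for j in range(i, number + 1, i):
--             cnt[j] += 1
--     answer = 0
--     for n in range(1, number + 1):
--         ct = cnt[n]
--         answer += power if ct > limit else ct
--     return answer
-- ===== Notes on version B (the rewrite author's own statement) =====
-- stated objective: faster
-- what changed: Replaces A's per-knight trial division (inner scan 1..n for every n) by a divisor-count sieve over one counter list (bump every multiple of each i), then one capped summing pass.
import Mathlib
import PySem

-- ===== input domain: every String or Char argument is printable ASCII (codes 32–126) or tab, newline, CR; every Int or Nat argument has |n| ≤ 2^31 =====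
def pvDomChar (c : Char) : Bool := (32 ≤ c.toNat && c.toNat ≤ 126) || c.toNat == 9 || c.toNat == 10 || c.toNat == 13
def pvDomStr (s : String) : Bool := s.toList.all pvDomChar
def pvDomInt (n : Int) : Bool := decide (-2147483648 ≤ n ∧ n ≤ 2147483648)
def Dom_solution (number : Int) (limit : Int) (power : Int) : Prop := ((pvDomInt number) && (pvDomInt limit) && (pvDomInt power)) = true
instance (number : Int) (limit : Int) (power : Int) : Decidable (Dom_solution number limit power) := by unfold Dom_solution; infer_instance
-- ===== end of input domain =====

-- B replaces A's per-knight trial division by a divisor-count sieve (bump every multiple of each i in one list), then one capped summing pass: asymptotically faster.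


-- ===== PORT A =====
def solution (number : Int) (limit : Int) (power : Int) : Int :=
  (PySem.List.pyRange 1 (number + 1) 1).foldl (fun answer n =>
    let ct := (PySem.List.pyRange 1 (n + 1) 1).foldl (fun ct i =>
      if PySem.Int.mod n i == 0 then ct + 1 else ct) 0
    if ct > limit then answer + power else answer + ct) 0

-- ===== PORT B =====
-- cnt[j] += 1 / cnt[n]: every index used lies in [1, number], i.e. strictly inside
-- the list of length number+1, so List.set / List.getD are exact for Python's
-- in-range list assignment and subscript here (no IndexError path is reachable).
def solution_alt (number : Int) (limit : Int) (power : Int) : Int :=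
  let cnt : List Int := PySem.List.pyRepeat [0] (number + 1)
  let cnt := (PySem.List.pyRange 1 (number + 1) 1).foldl (fun cnt i =>
    (PySem.List.pyRange i (number + 1) i).foldl (fun cnt j =>
      cnt.set j.toNat (cnt.getD j.toNat 0 + 1)) cnt) cnt
  (PySem.List.pyRange 1 (number + 1) 1).foldl (fun answer n =>
    let ct := cnt.getD n.toNat 0
    answer + (if ct > limit then power else ct)) 0

-- ===== PRECONDITION & SPEC =====
def Spec_solution (number : Int) (limit : Int) (power : Int) (out : Int) : Prop := out = solution_alt number limit power
instance (number : Int) (limit : Int) (power : Int) (out : Int) : Decidable (Spec_solution number limit power out) := by unfold Spec_solution; infer_instance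

-- ===== CLAIM (what is proved, stated in full; the proofs are below) =====
def Claim_equal_solution : Prop := ∀ (number : Int) (limit : Int) (power : Int), Dom_solution number limit power → Spec_solution number limit power (solution number limit power)

-- ===== LEMMAS AND PROOFS =====

theorem pv_getD_set_self (c : List Int) (k : Nat) (x : Int) (h : k < c.length) :
    (c.set k x).getD k 0 = x := by
  induction c generalizing k with
  | nil => simp at h
  | cons a t ih =>
    cases k with
    | zero => simp
    | succ m => simpa using ih m (by simpa using h)

theorem pv_getD_set_ne (c : List Int) (k v : Nat) (x : Int) (h : v ≠ k) :
    (c.set k x).getD v 0 = c.getD v 0 := by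
  induction c generalizing k v with
  | nil => simp
  | cons a t ih =>
    cases k with
    | zero => cases v with
      | zero => exact absurd rfl h
      | succ m => simp
    | succ m => cases v with
      | zero => simp
      | succ w => simpa using ih m w (by omega)

theorem pv_getD_replicate (m v : Nat) : (List.replicate m (0 : Int)).getD v 0 = 0 := by
  induction m generalizing v with
  | zero => simp
  | succ m ih =>
    cases v with
    | zero => simp
    | succ w => simpa using ih w

-- one bump step: the count at v grows by 1 exactly when v is the bumped in-range index
theorem pv_bump_getD (c : List Int) (j : Int) (v : Nat) (hj : j.toNat < c.length) :
    (c.set j.toNat (c.getD j.toNat 0 + 1)).getD v 0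
      = c.getD v 0 + (if j.toNat = v then 1 else 0) := by
  by_cases h : j.toNat = v
  · subst h
    rw [pv_getD_set_self c j.toNat _ hj]
    simp
  · rw [pv_getD_set_ne c j.toNat v _ (fun hc => h hc.symm)]
    simp [h]

-- the inner sieve loop preserves the list's length
theorem pv_bump_fold_length (js : List Int) (c : List Int) :
    (js.foldl (fun cnt j => cnt.set j.toNat (cnt.getD j.toNat 0 + 1)) c).length = c.length := by
  induction js generalizing c with
  | nil => rfl
  | cons j t ih => simpa using ih (c.set j.toNat (c.getD j.toNat 0 + 1))

-- the inner sieve loop adds the multiplicity of v among the bumped indices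
theorem pv_bump_fold_getD (js : List Int) (c : List Int) (v : Nat)
    (H : ∀ j ∈ js, j.toNat < c.length) :
    (js.foldl (fun cnt j => cnt.set j.toNat (cnt.getD j.toNat 0 + 1)) c).getD v 0
      = c.getD v 0 + (js.countP (fun j => j.toNat == v) : Int) := by
  induction js generalizing c with
  | nil => simp
  | cons j t ih =>
    have hj : j.toNat < c.length := H j (List.mem_cons_self)
    have hlen : (c.set j.toNat (c.getD j.toNat 0 + 1)).length = c.length := by simp
    rw [List.foldl_cons, ih _ (fun x hx => by rw [hlen]; exact H x (List.mem_cons_of_mem j hx)),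
      pv_bump_getD c j v hj, List.countP_cons]
    by_cases h : j.toNat = v <;> simp [h] <;> ring

-- the whole nested sieve: the count at v is its total multiplicity over all bumped index lists
theorem pv_sieve_fold_getD (g : Int → List Int) (l : List Int) (c : List Int) (v : Nat)
    (H : ∀ i ∈ l, ∀ j ∈ g i, j.toNat < c.length) :
    (l.foldl (fun cnt i => (g i).foldl (fun cnt j => cnt.set j.toNat (cnt.getD j.toNat 0 + 1)) cnt) c).getD v 0
      = c.getD v 0 + (l.map (fun i => (((g i).countP (fun j => j.toNat == v)) : Int))).sum := by
  induction l generalizing c with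
  | nil => simp
  | cons i t ih =>
    rw [List.foldl_cons,
      ih _ (fun x hx j hj => by
        rw [pv_bump_fold_length]; exact H x (List.mem_cons_of_mem i hx) j hj),
      pv_bump_fold_getD _ _ _ (H i List.mem_cons_self), List.map_cons, List.sum_cons]
    ring

-- a positive-step pyRange has no duplicates
theorem pv_nodup_pyRange_pos (a b : Int) {s : Int} (hs : 0 < s) :
    (PySem.List.pyRange a b s).Nodup := by
  rw [PySem.List.pyRange_of_pos a b hs]
  refine List.Nodup.map ?_ (List.nodup_range)
  intro x y h
  have hxy : s * (x : Int) = s * y := by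
    have := add_left_cancel h
    linarith
  have hx : (x : Int) = y := mul_left_cancel₀ (ne_of_gt hs) hxy
  exact_mod_cast hx

-- multiplicity of n in range(i, number+1, i) is 1 iff i divides n (for 1 ≤ i, 1 ≤ n ≤ number)
theorem pv_count_multiples (number n i : Int) (hi : 1 ≤ i) (_hn : 1 ≤ n) (hnN : n ≤ number) :
    ((PySem.List.pyRange i (number + 1) i).count n : Int)
      = if (decide (i ∣ n ∧ i ≤ n)) then (1 : Int) else 0 := by
  have hs : (0 : Int) < i := by omega
  have hmem : n ∈ PySem.List.pyRange i (number + 1) i ↔ (i ∣ n ∧ i ≤ n) := by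
    rw [PySem.List.mem_pyRange_iff_of_pos hs]
    constructor
    · rintro ⟨h1, h2, h3⟩
      refine ⟨?_, h1⟩
      have : n - i + i = n := by ring
      simpa [this] using dvd_add h3 (dvd_refl i)
    · rintro ⟨h1, h2⟩
      exact ⟨h2, by omega, dvd_sub h1 (dvd_refl i)⟩
  by_cases h : i ∣ n ∧ i ≤ n
  · have hm : n ∈ PySem.List.pyRange i (number + 1) i := hmem.mpr h
    simp [h, List.count_eq_one_of_mem (pv_nodup_pyRange_pos i (number + 1) hs) hm]
  · have hm : n ∉ PySem.List.pyRange i (number + 1) i := fun hc => h (hmem.mp hc)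
    simp [h, List.count_eq_zero_of_not_mem hm]

-- on the sieve's index lists, matching j.toNat against n.toNat is counting the value n itself
theorem pv_countP_toNat_eq_count (number n i : Int) (hi : 1 ≤ i) (hn : 1 ≤ n) :
    ((PySem.List.pyRange i (number + 1) i).countP (fun j => j.toNat == n.toNat))
      = (PySem.List.pyRange i (number + 1) i).count n := by
  rw [List.count_eq_countP]
  apply List.countP_congr
  intro j hj
  have hs : (0 : Int) < i := by omega
  have hjb := (PySem.List.mem_pyRange_iff_of_pos hs j).mp hj
  constructor
  · intro h
    simp only [beq_iff_eq] at h ⊢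
    omega
  · intro h
    simp only [beq_iff_eq] at h ⊢
    omega

-- the sieve total at n equals A's trial-division divisor count
theorem pv_sieve_eq_trial (number n : Int) (hn : 1 ≤ n) (hnN : n ≤ number) :
    ((PySem.List.pyRange 1 (number + 1) 1).map
        (fun i => (((PySem.List.pyRange i (number + 1) i).countP (fun j => j.toNat == n.toNat)) : Int))).sum
      = ((PySem.List.pyRange 1 (n + 1) 1).countP (fun i => PySem.Int.mod n i == 0) : Int) := by
  have hmapeq : ((PySem.List.pyRange 1 (number + 1) 1).map
        (fun i => (((PySem.List.pyRange i (number + 1) i).countP (fun j => j.toNat == n.toNat)) : Int)))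
      = ((PySem.List.pyRange 1 (number + 1) 1).map
        (fun i => if (decide (i ∣ n ∧ i ≤ n)) then (1 : Int) else 0)) := by
    apply List.map_congr_left
    intro i hi
    have hi1 : 1 ≤ i ∧ i < number + 1 := (PySem.List.mem_pyRange_one).mp hi
    rw [pv_countP_toNat_eq_count number n i hi1.1 hn]
    exact pv_count_multiples number n i hi1.1 hn hnN
  rw [hmapeq, PySem.List.sum_map_ite_one_zero (fun i => decide (i ∣ n ∧ i ≤ n))]
  congr 1
  rw [PySem.List.pyRange_one_append 1 (n + 1) (number + 1) (by omega) (by omega),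
    List.countP_append]
  have h2 : (PySem.List.pyRange (n + 1) (number + 1) 1).countP
      (fun i => decide (i ∣ n ∧ i ≤ n)) = 0 := by
    apply List.countP_eq_zero.mpr
    intro i hi
    have := (PySem.List.mem_pyRange_one).mp hi
    simp only [decide_eq_true_eq]
    rintro ⟨-, h⟩; omega
  rw [h2, Nat.add_zero]
  apply List.countP_congr
  intro i hi
  have hib := (PySem.List.mem_pyRange_one).mp hi
  have hdvd : PySem.Int.mod n i = 0 ↔ i ∣ n := PySem.Int.mod_eq_zero_iff_dvd n i
  constructor
  · intro h
    simp only [decide_eq_true_eq] at h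
    simpa using hdvd.mpr h.1
  · intro h
    simp only [beq_iff_eq] at h
    simp only [decide_eq_true_eq]
    exact ⟨hdvd.mp h, by omega⟩

-- ===== VERDICT (by name: the statement is the Claim_ definition above) =====
theorem solution_spec : Claim_equal_solution := by
  intro number limit power _
  unfold Spec_solution solution solution_alt
  simp only []
  apply PySem.List.foldl_congr_mem
  intro acc n hn
  have hnb := (PySem.List.mem_pyRange_one).mp hn
  rw [PySem.List.foldl_if_add_one (fun i => PySem.Int.mod n i == 0)]
  rw [pv_sieve_fold_getD _ _ _ _ (fun i hi j hj => by
    have hi1 := (PySem.List.mem_pyRange_one).mp hi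
    have hs : (0 : Int) < i := by omega
    have hjb := (PySem.List.mem_pyRange_iff_of_pos hs j).mp hj
    rw [PySem.List.pyRepeat_singleton, List.length_replicate]
    omega)]
  rw [PySem.List.pyRepeat_singleton, pv_getD_replicate]
  rw [pv_sieve_eq_trial number n (by omega) (by omega)]
  simp only [zero_add]
  split <;> ring
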